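-- pv_equiv track=rewrite | github.com/ayukyo/alltoolkit | Python/fortune_utils/mod.py | from_cookie_format
-- ===== SOURCE A (Python) =====
-- from typing import List, Dict, Optional, Tuple, Callable, Any
--
-- def from_cookie_format(content: str, delimiter: str = "%") -> List[str]:
--     """
--     Parse Unix fortune cookie file format to a list of fortunes.
--
--     Args:
--         content: Cookie file content
--         delimiter: Delimiter character (default: %)
--
--     Returns:
--         List of fortune strings
--
--     Example:
--         >>> from_cookie_format("Fortune 1\\n%\\nFortune 2\\n%\\n")
--         ['Fortune 1', 'Fortune 2']
--     """
--     fortunes = []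
--     current = []
--
--     for line in content.split("\n"):
--         if line.strip() == delimiter:
--             if current:
--                 fortunes.append("\n".join(current).strip())
--                 current = []
--         else:
--             current.append(line)
--
--     # Handle last fortune without delimiter
--     if current:
--         fortunes.append("\n".join(current).strip())
--
--     return [f for f in fortunes if f]  # Remove empty strings
-- ===== SOURCE B (Python) =====
-- from typing import List
--
-- def from_cookie_format(content: str, delimiter: str = "%") -> List[str]:
--     lines = content.split("\n")
--     cuts = [-1] + [i for i, line in enumerate(lines) if line.strip() == delimiter] + [len(lines)]
--     fortunes = ["\n".join(lines[a + 1:b]).strip() for a, b in zip(cuts, cuts[1:])]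
--     return [f for f in fortunes if f]
-- ===== Notes on version B (the rewrite author's own statement) =====
-- stated objective: alternative
-- what changed: B first computes the positions of all delimiter lines (a cut-index list), then extracts each fortune by slicing the line list between consecutive cuts (zip of the cut list with its tail), replacing A's stateful accumulator/flush loop with staged index-arithmetic passes.
import Mathlib
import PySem

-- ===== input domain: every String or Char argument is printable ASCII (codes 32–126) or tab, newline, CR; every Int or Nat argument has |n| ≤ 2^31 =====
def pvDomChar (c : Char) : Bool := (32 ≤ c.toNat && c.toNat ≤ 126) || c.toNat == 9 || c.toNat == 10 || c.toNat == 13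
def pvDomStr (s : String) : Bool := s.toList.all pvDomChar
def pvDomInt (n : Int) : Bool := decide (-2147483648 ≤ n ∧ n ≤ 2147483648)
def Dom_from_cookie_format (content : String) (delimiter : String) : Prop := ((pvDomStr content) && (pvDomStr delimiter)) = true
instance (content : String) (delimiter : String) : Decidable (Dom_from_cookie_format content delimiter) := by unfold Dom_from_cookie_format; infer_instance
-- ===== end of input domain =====

-- B replaces A's accumulator/flush loop by staged passes: compute the delimiter line
-- positions (cut indices), then slice each fortune out between consecutive cuts — objective: alternative.


-- ===== PORT A =====
-- A: fold over the lines with state (fortunes, current); flush current on each delimiter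
-- line and once more at the end; finally drop empty fortunes.
def from_cookie_format (content : String) (delimiter : String) : List String :=
  let st : List String × List String := (((PySem.Str.split? content "\n").getD [])).foldl
    (fun (s : List String × List String) line =>
      if PySem.Str.strip line == delimiter then
        if !s.2.isEmpty then (s.1 ++ [PySem.Str.strip (PySem.Str.join "\n" s.2)], []) else s
      else (s.1, s.2 ++ [line])) ([], [])
  let fortunes := if !st.2.isEmpty then st.1 ++ [PySem.Str.strip (PySem.Str.join "\n" st.2)] else st.1
  fortunes.filter (fun f => f != "")

-- ===== PORT B =====
-- B: cuts = [-1] ++ indices of delimiter lines ++ [len(lines)]; each fortune is the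
-- slice lines[a+1:b] for consecutive cuts (a, b) = zip(cuts, cuts[1:]), joined and stripped.
def from_cookie_format_alt (content : String) (delimiter : String) : List String :=
  let lines := (PySem.Str.split? content "\n").getD []
  let cuts : List Int :=
    [-1] ++ ((PySem.List.enumerate lines).filter
        (fun q => PySem.Str.strip q.2 == delimiter)).map (fun q => q.1)
      ++ [(lines.length : Int)]
  let fortunes := (cuts.zip (PySem.List.slice cuts (some 1) none)).map
    (fun q => PySem.Str.strip (PySem.Str.join "\n" (PySem.List.slice lines (some (q.1 + 1)) (some q.2))))
  fortunes.filter (fun f => f != "")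

-- ===== PRECONDITION & SPEC =====
def Spec_from_cookie_format (content : String) (delimiter : String) (out : List String) : Prop := out = from_cookie_format_alt content delimiter
instance (content : String) (delimiter : String) (out : List String) : Decidable (Spec_from_cookie_format content delimiter out) := by unfold Spec_from_cookie_format; infer_instance

-- ===== CLAIM (what is proved, stated in full; the proofs are below) =====
def Claim_equal_from_cookie_format : Prop := ∀ (content : String) (delimiter : String), Dom_from_cookie_format content delimiter → Spec_from_cookie_format content delimiter (from_cookie_format content delimiter)

-- ===== LEMMAS AND PROOFS =====

-- maximal runs of non-delimiter lines (proof-only characterisation both sides are reduced to)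
def pvRuns (d : String) : List String → List (List String)
  | [] => []
  | l :: ls =>
    if PySem.Str.strip l == d then pvRuns d ls
    else (l :: ls.takeWhile (fun x => PySem.Str.strip x != d)) ::
         pvRuns d (ls.dropWhile (fun x => PySem.Str.strip x != d))
termination_by ls => ls.length
decreasing_by
  all_goals
    have := List.length_dropWhile_le (p := fun x => PySem.Str.strip x != d) (l := ls)
    simp <;> omega

-- the list of fortunes A's loop appends from state `cur` onwards (including the final flush)
def goA (d : String) (cur : List String) : List String → List String
  | [] => if !cur.isEmpty then [PySem.Str.strip (PySem.Str.join "\n" cur)] else []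
  | l :: ls =>
    if PySem.Str.strip l == d then
      if !cur.isEmpty then PySem.Str.strip (PySem.Str.join "\n" cur) :: goA d [] ls
      else goA d [] ls
    else goA d (cur ++ [l]) ls

lemma goA_loop (d : String) (ls : List String) : ∀ (fs cur : List String),
    (if !(ls.foldl
        (fun (s : List String × List String) line =>
          if PySem.Str.strip line == d then
            if !s.2.isEmpty then (s.1 ++ [PySem.Str.strip (PySem.Str.join "\n" s.2)], []) else s
          else (s.1, s.2 ++ [line])) (fs, cur)).2.isEmpty then
        (ls.foldl
        (fun (s : List String × List String) line =>
          if PySem.Str.strip line == d then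
            if !s.2.isEmpty then (s.1 ++ [PySem.Str.strip (PySem.Str.join "\n" s.2)], []) else s
          else (s.1, s.2 ++ [line])) (fs, cur)).1 ++ [PySem.Str.strip (PySem.Str.join "\n"
            (ls.foldl
        (fun (s : List String × List String) line =>
          if PySem.Str.strip line == d then
            if !s.2.isEmpty then (s.1 ++ [PySem.Str.strip (PySem.Str.join "\n" s.2)], []) else s
          else (s.1, s.2 ++ [line])) (fs, cur)).2)]
      else (ls.foldl
        (fun (s : List String × List String) line =>
          if PySem.Str.strip line == d then
            if !s.2.isEmpty then (s.1 ++ [PySem.Str.strip (PySem.Str.join "\n" s.2)], []) else s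
          else (s.1, s.2 ++ [line])) (fs, cur)).1)
      = fs ++ goA d cur ls := by
  induction ls with
  | nil =>
    intro fs cur
    simp only [List.foldl_nil, goA]
    cases cur <;> simp
  | cons l ls ih =>
    intro fs cur
    simp only [List.foldl_cons, goA]
    by_cases h : (PySem.Str.strip l == d) = true
    · simp only [h, if_true]
      cases cur with
      | nil => simpa using ih fs []
      | cons c cs => simpa using ih (fs ++ [PySem.Str.strip (PySem.Str.join "\n" (c :: cs))]) []
    · simp only [h, if_false, Bool.false_eq_true]
      simpa [h] using ih fs (cur ++ [l])

lemma goA_skip (d : String) (l : String) (ls : List String)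
    (h : (PySem.Str.strip l == d) = true) : goA d [] (l :: ls) = goA d [] ls := by
  simp [goA, h]

lemma goA_cons_ne (d : String) (cur : List String) (hcur : cur ≠ []) (ls : List String) :
    goA d cur ls
      = PySem.Str.strip (PySem.Str.join "\n" (cur ++ ls.takeWhile (fun x => PySem.Str.strip x != d)))
        :: goA d [] (ls.dropWhile (fun x => PySem.Str.strip x != d)) := by
  induction ls generalizing cur with
  | nil => simp [goA, hcur]
  | cons l ls ih =>
    by_cases h : (PySem.Str.strip l == d) = true
    · have hb : (PySem.Str.strip l != d) = false := by simp [bne, h]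
      simp [goA, h, hb, hcur, goA_skip d l ls h]
    · have hb : (PySem.Str.strip l != d) = true := by simp [bne, h]
      have hih := ih (cur ++ [l]) (by simp)
      simp only [goA, h, Bool.false_eq_true, if_false, List.takeWhile_cons, List.dropWhile_cons,
        hb, if_true] at *
      simp [hih]

lemma goA_eq_runs (d : String) : ∀ (ls : List String),
    goA d [] ls = (pvRuns d ls).map (fun g => PySem.Str.strip (PySem.Str.join "\n" g)) := by
  intro ls
  induction hn : ls.length using Nat.strong_induction_on generalizing ls with
  | _ n ih =>
  cases ls with
  | nil => simp [goA, pvRuns]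
  | cons l ls =>
    by_cases h : (PySem.Str.strip l == d) = true
    · rw [goA_skip d l ls h]
      rw [ih ls.length (by simp [← hn]) ls rfl]
      simp [pvRuns, h]
    · have h1 : goA d [] (l :: ls) = goA d [l] ls := by simp [goA, h]
      rw [h1, goA_cons_ne d [l] (by simp) ls]
      have hlen : (ls.dropWhile (fun x => PySem.Str.strip x != d)).length < n := by
        have := List.length_dropWhile_le (p := fun x => PySem.Str.strip x != d) (l := ls)
        simp [← hn]; omega
      rw [ih _ hlen _ rfl]
      simp [pvRuns, h]

-- ----- B side: the cut/slice construction equals List.splitOnP -----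

def pvCuts (d : String) (ls : List String) : List Int :=
  -1 :: (((PySem.List.enumerate ls).filter
      (fun q => PySem.Str.strip q.2 == d)).map (fun q => q.1) ++ [(ls.length : Int)])

def pvBlocks (d : String) (ls : List String) : List (List String) :=
  ((pvCuts d ls).zip ((pvCuts d ls).drop 1)).map
    (fun q => PySem.List.slice ls (some (q.1 + 1)) (some q.2))

lemma enumerate_shift {α : Type} (xs : List α) (s : Int) :
    PySem.List.enumerate xs (s + 1) = (PySem.List.enumerate xs s).map (fun q => (q.1 + 1, q.2)) := by
  induction xs generalizing s with
  | nil => simp [PySem.List.enumerate_nil]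
  | cons x xs ih => simp [PySem.List.enumerate_cons, ih]

lemma slice_cons_shift (l : String) (ls : List String) (a b : Int) (ha : 0 ≤ a) (hb : 0 ≤ b) :
    PySem.List.slice (l :: ls) (some (a + 1)) (some (b + 1)) = PySem.List.slice ls (some a) (some b) := by
  rw [PySem.List.slice_toNat _ (by omega) (by omega), PySem.List.slice_toNat _ ha hb]
  have h1 : (a + 1).toNat = a.toNat + 1 := by omega
  have h2 : (b + 1).toNat = b.toNat + 1 := by omega
  simp [h1, h2]

lemma slice_cons_zero (l : String) (ls : List String) (b : Int) (hb : 0 ≤ b) :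
    PySem.List.slice (l :: ls) (some 0) (some (b + 1)) = l :: PySem.List.slice ls (some 0) (some b) := by
  rw [PySem.List.slice_toNat _ (by omega) (by omega), PySem.List.slice_toNat _ le_rfl hb]
  have h2 : (b + 1).toNat = b.toNat + 1 := by omega
  simp [h2, List.take_succ_cons]

lemma pvCuts_tail_nonneg (d : String) (ls : List String) :
    ∀ x ∈ (pvCuts d ls).drop 1, 0 ≤ x := by
  intro x hx
  simp only [pvCuts, List.drop_succ_cons, List.drop_zero, List.mem_append, List.mem_map,
    List.mem_filter, List.mem_singleton] at hx
  rcases hx with ⟨q, ⟨hq, _⟩, rfl⟩ | rfl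
  · rcases (PySem.List.mem_enumerate_iff _ _ _).1 hq with ⟨k, hk, rfl⟩
    simp
  · positivity

lemma pvCuts_cons (d : String) (l : String) (ls : List String) :
    pvCuts d (l :: ls)
      = -1 :: ((if PySem.Str.strip l == d then [(0 : Int)] else []) ++
          ((pvCuts d ls).drop 1).map (· + 1)) := by
  simp only [pvCuts, List.drop_succ_cons, List.drop_zero]
  have he : PySem.List.enumerate (l :: ls) 0 = (0, l) :: (PySem.List.enumerate ls 0).map (fun q => (q.1 + 1, q.2)) := by
    rw [PySem.List.enumerate_cons]
    rw [show ((0:Int)+1) = 0 + 1 from rfl, enumerate_shift]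
  rw [he]
  by_cases h : (PySem.Str.strip l == d) = true
  · simp [h, List.filter_map, List.map_map, Function.comp_def]
  · simp [h, List.filter_map, List.map_map, Function.comp_def]

lemma pvBlocks_nil (d : String) : pvBlocks d [] = [[]] := by
  simp [pvBlocks, pvCuts, PySem.List.enumerate_nil, PySem.List.slice]

lemma zip_shift_slices (l : String) (ls : List String) (A B : List Int)
    (hA : ∀ x ∈ A, -1 ≤ x) (hB : ∀ x ∈ B, 0 ≤ x) :
    ((A.map (· + 1)).zip (B.map (· + 1))).map
        (fun q => PySem.List.slice (l :: ls) (some (q.1 + 1)) (some q.2))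
      = (A.zip B).map (fun q => PySem.List.slice ls (some (q.1 + 1)) (some q.2)) := by
  rw [List.zip_map]
  rw [List.map_map]
  apply List.map_congr_left
  intro q hq
  obtain ⟨h1, h2⟩ := List.of_mem_zip hq
  simp only [Function.comp, Prod.map]
  exact slice_cons_shift l ls (q.1 + 1) q.2 (by have := hA _ h1; omega) (hB _ h2)

lemma pvBlocks_cons_delim (d : String) (l : String) (ls : List String)
    (h : (PySem.Str.strip l == d) = true) :
    pvBlocks d (l :: ls) = [] :: pvBlocks d ls := by
  have hc := pvCuts_cons d l ls
  rw [h] at hc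
  simp only [if_true] at hc
  have hrest : (0 : Int) :: ((pvCuts d ls).drop 1).map (· + 1) = (pvCuts d ls).map (· + 1) := by
    simp [pvCuts]
  unfold pvBlocks
  rw [hc]
  simp only [List.singleton_append, List.drop_succ_cons, List.drop_zero, List.zip_cons_cons,
    List.map_cons]
  rw [hrest]
  refine congrArg₂ List.cons ?_ ?_
  · show PySem.List.slice (l :: ls) (some (-1 + 1)) (some 0) = []
    norm_num [PySem.List.slice]
  · exact zip_shift_slices l ls (pvCuts d ls) ((pvCuts d ls).drop 1)
      (by intro x hx
          rcases List.mem_cons.1 hx with rfl | hx'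
          · omega
          · have := pvCuts_tail_nonneg d ls x (by simpa [pvCuts] using hx'); omega)
      (pvCuts_tail_nonneg d ls)

lemma pvBlocks_cons_ne (d : String) (l : String) (ls : List String)
    (h : (PySem.Str.strip l == d) = false) :
    pvBlocks d (l :: ls) = (pvBlocks d ls).modifyHead (l :: ·) := by
  have hc := pvCuts_cons d l ls
  rw [h] at hc
  simp only [Bool.false_eq_true, if_false, List.nil_append] at hc
  obtain ⟨r, rs, hr⟩ : ∃ r rs, (pvCuts d ls).drop 1 = r :: rs := by
    refine List.exists_cons_of_ne_nil ?_ |>.imp fun r ⟨rs, h⟩ => ⟨rs, h⟩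
    simp [pvCuts]
  have hr0 : (0 : Int) ≤ r := pvCuts_tail_nonneg d ls r (by rw [hr]; exact List.mem_cons_self ..)
  have hrs : ∀ x ∈ rs, (0 : Int) ≤ x := fun x hx =>
    pvCuts_tail_nonneg d ls x (by rw [hr]; exact List.mem_cons_of_mem _ hx)
  have hlhs : pvCuts d (l :: ls) = -1 :: (r + 1) :: rs.map (· + 1) := by
    rw [hc, hr]; simp
  have hBls : pvBlocks d ls
      = PySem.List.slice ls (some (-1 + 1)) (some r)
        :: (((r :: rs).zip rs).map (fun q => PySem.List.slice ls (some (q.1 + 1)) (some q.2))) := by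
    unfold pvBlocks
    rw [hr]
    have : pvCuts d ls = -1 :: r :: rs := by
      have := congrArg (List.cons (-1 : Int)) hr
      simpa [pvCuts] using this
    rw [this]
    simp
  rw [hBls]
  unfold pvBlocks
  rw [hlhs]
  simp only [List.drop_succ_cons, List.drop_zero, List.zip_cons_cons, List.map_cons,
    List.modifyHead_cons]
  refine congrArg₂ List.cons ?_ ?_
  · show PySem.List.slice (l :: ls) (some (-1 + 1)) (some (r + 1)) = _
    norm_num
    have := slice_cons_zero l ls r hr0
    simpa using this
  · have := zip_shift_slices l ls (r :: rs) rs
      (by intro x hx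
          rcases List.mem_cons.1 hx with rfl | hx'
          · omega
          · have := hrs _ hx'; omega)
      hrs
    simpa using this

lemma pvBlocks_eq_splitOnP (d : String) (ls : List String) :
    pvBlocks d ls = List.splitOnP (fun l => PySem.Str.strip l == d) ls := by
  induction ls with
  | nil => rw [pvBlocks_nil, List.splitOnP_nil]
  | cons l ls ih =>
    rw [List.splitOnP_cons]
    by_cases h : (PySem.Str.strip l == d) = true
    · rw [pvBlocks_cons_delim d l ls h, ih, if_pos h]
    · rw [pvBlocks_cons_ne d l ls (by simpa using h), ih, if_neg h]

-- ----- runs = nonempty pieces of splitOnP -----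

lemma splitOnP_prefix (d : String) (ys : List String) : ∀ (xs : List String),
    (∀ x ∈ xs, (PySem.Str.strip x == d) = false) →
    List.splitOnP (fun l => PySem.Str.strip l == d) (xs ++ ys)
      = (List.splitOnP (fun l => PySem.Str.strip l == d) ys).modifyHead (xs ++ ·) := by
  intro xs
  induction xs with
  | nil =>
    intro _
    simp only [List.nil_append]
    cases List.splitOnP (fun l => PySem.Str.strip l == d) ys <;> simp
  | cons x xs ih =>
    intro hall
    have hx : (PySem.Str.strip x == d) = false := hall x (List.mem_cons_self ..)
    rw [List.cons_append, List.splitOnP_cons, hx]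
    simp only [Bool.false_eq_true, if_false]
    rw [ih (fun y hy => hall y (List.mem_cons_of_mem _ hy))]
    cases List.splitOnP (fun l => PySem.Str.strip l == d) ys <;> simp

lemma runs_eq_filter_splitOnP (d : String) : ∀ (ls : List String),
    pvRuns d ls = (List.splitOnP (fun l => PySem.Str.strip l == d) ls).filter (fun g => !g.isEmpty) := by
  intro ls
  induction hn : ls.length using Nat.strong_induction_on generalizing ls with
  | _ n ih =>
  cases ls with
  | nil => simp [pvRuns, List.splitOnP_nil]
  | cons l ls =>
    rw [List.splitOnP_cons]
    by_cases h : (PySem.Str.strip l == d) = true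
    · rw [if_pos h]
      have : pvRuns d (l :: ls) = pvRuns d ls := by simp [pvRuns, h]
      rw [this, ih ls.length (by simp [← hn]) ls rfl]
      simp
    · rw [if_neg h]
      have hsplit : ls = ls.takeWhile (fun x => PySem.Str.strip x != d)
          ++ ls.dropWhile (fun x => PySem.Str.strip x != d) := (List.takeWhile_append_dropWhile).symm
      have htw : ∀ x ∈ ls.takeWhile (fun x => PySem.Str.strip x != d), (PySem.Str.strip x == d) = false := by
        intro x hx
        have := List.mem_takeWhile_imp hx
        simpa [bne] using this
      conv_lhs => rw [show pvRuns d (l :: ls)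
        = (l :: ls.takeWhile (fun x => PySem.Str.strip x != d))
          :: pvRuns d (ls.dropWhile (fun x => PySem.Str.strip x != d)) from by simp [pvRuns, h]]
      conv_rhs => rw [hsplit]
      rw [splitOnP_prefix d _ _ htw]
      cases hdw : ls.dropWhile (fun x => PySem.Str.strip x != d) with
      | nil =>
        simp only [List.splitOnP_nil, List.modifyHead_cons, List.append_nil]
        simp [pvRuns]
      | cons y ys =>
        have hy : (PySem.Str.strip y == d) = true := by
          have := List.head_dropWhile_not (p := fun x => PySem.Str.strip x != d) (l := ls) (by simp [hdw])
          simp only [hdw, List.head_cons] at this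
          simpa [bne] using this
        rw [List.splitOnP_cons, if_pos hy]
        simp only [List.modifyHead_cons, List.append_nil]
        have hlen : ys.length < n := by
          have h1 := List.length_dropWhile_le (p := fun x => PySem.Str.strip x != d) (l := ls)
          rw [hdw] at h1
          simp only [List.length_cons] at h1 hn
          omega
        have : pvRuns d (y :: ys) = pvRuns d ys := by simp [pvRuns, hy]
        rw [this, ih ys.length hlen ys rfl]
        simp

lemma filter_map_filter_empty (xs : List (List String)) :
    ((xs.map (fun g => PySem.Str.strip (PySem.Str.join "\n" g))).filter (fun f => f != ""))
      = (((xs.filter (fun g => !g.isEmpty)).map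
          (fun g => PySem.Str.strip (PySem.Str.join "\n" g))).filter (fun f => f != "")) := by
  induction xs with
  | nil => rfl
  | cons g xs ih =>
    cases g with
    | nil =>
      have hnil : (PySem.Str.strip (PySem.Str.join "\n" ([] : List String)) != "") = false := by decide
      simp only [List.map_cons, List.filter_cons, hnil, List.isEmpty_nil, Bool.not_true]
      simpa using ih
    | cons a g' =>
      simp only [List.map_cons, List.filter_cons, List.isEmpty_cons, Bool.not_false]
      rw [ih]
      split_ifs <;> simp_all

lemma slice_one (xs : List Int) : PySem.List.slice xs (some 1) none = xs.drop 1 := by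
  simpa using PySem.List.slice_from_natCast xs 1

-- ===== VERDICT (by name: the statement is the Claim_ definition above) =====
theorem from_cookie_format_spec : Claim_equal_from_cookie_format := by
  intro content delimiter _
  unfold Spec_from_cookie_format
  simp only [from_cookie_format, from_cookie_format_alt]
  rw [goA_loop delimiter ((PySem.Str.split? content "\n").getD []) [] []]
  rw [goA_eq_runs]
  simp only [List.nil_append]
  rw [runs_eq_filter_splitOnP, ← filter_map_filter_empty, ← pvBlocks_eq_splitOnP, slice_one]
  simp only [pvBlocks, pvCuts, List.map_map, List.singleton_append]
  rfl
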